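-- pv_equiv track=rewrite | github.com/ahalani1/CP468 | a2.py | getHeuristics
-- ===== SOURCE A (Python) =====
-- finalstate = [3,2,1,
--               4,0,5]
--
-- def getHeuristics(tempstartingstate):
--     h = 0
--     for i in range(6):
--         for j in range(6):
--             if tempstartingstate[i]!= 0 and tempstartingstate[i] == finalstate[j]:
--                 findex = j
--                 if i == 0:
--                     if findex == 0:
--                         h+=0
--                     elif findex == 1:
--                         h += 1
--                     elif findex == 2:
--                         h += 2
--                     elif findex == 3:
--                         h += 1
--                     elif findex == 4:
--                         h += 2
--                     elif findex == 5:
--                         h += 3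
--                 elif i == 1:
--                     if findex == 0:
--                         h+=1
--                     elif findex == 1:
--                         h += 0
--                     elif findex == 2:
--                         h += 1
--                     elif findex == 3:
--                         h += 2
--                     elif findex == 4:
--                         h += 1
--                     elif findex == 5:
--                         h += 2
--                 elif i == 2:
--                     if findex == 0:
--                         h += 2
--                     elif findex == 1:
--                         h += 1
--                     elif findex == 2:
--                         h += 0
--                     elif findex == 3:
--                         h += 3
--                     elif findex == 4:
--                         h += 2
--                     elif findex == 5:
--                         h += 1
--                 elif i == 3:
--                     if findex == 0:
--                         h += 1
--                     elif findex == 1: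
--                         h += 2
--                     elif findex == 2:
--                         h += 3
--                     elif findex == 3:
--                         h += 0
--                     elif findex == 4:
--                         h += 1
--                     elif findex == 5:
--                         h += 2
--                 elif i == 4:
--                     if findex == 0:
--                         h += 2
--                     elif findex == 1:
--                         h += 1
--                     elif findex == 2:
--                         h += 2
--                     elif findex == 3:
--                         h += 1
--                     elif findex == 4:
--                         h += 0
--                     elif findex == 5:
--                         h += 1
--                 elif i == 5:
--                     if findex == 3:
--                         h += 3
--                     elif findex == 1:
--                         h += 2
--                     elif findex == 2:
--                         h += 1
--                     elif findex == 3: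
--                         h += 2
--                     elif findex == 4:
--                         h += 1
--                     elif findex == 5:
--                         h += 0
--     return h
--
--
--
--
--
--
--
--
--     return h
-- ===== SOURCE B (Python) =====
-- finalstate = [3,2,1,
--               4,0,5]
--
-- def getHeuristics(tempstartingstate):
--     # geometric Manhattan distance on the 2x3 grid instead of a branch table
--     h = 0
--     for i in range(6):
--         v = tempstartingstate[i]
--         if v != 0 and v in finalstate:
--             j = finalstate.index(v)
--             h += abs(i // 3 - j // 3) + abs(i % 3 - j % 3)
--     return h
-- ===== Notes on version B (the rewrite author's own statement) =====
-- stated objective: alternative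
-- what changed: Replaces A's nested 6x6 scan with hand-written if/elif distance chains by arithmetic: find the goal position once with list.index and add the geometric Manhattan distance abs(i//3 - j//3) + abs(i%3 - j%3) on the 2x3 grid, so no distance table or branch chain exists at all.
-- intended difference: On inputs of length >= 6 whose element at index 5 is 3 or 4, A's i==5 branch chain is buggy (no branch for findex 0, and findex 3 is caught by a duplicated first branch adding 3), so A returns a total that is 3 too small (value 3) or 1 too large (value 4); B returns the true Manhattan distance, which is the intended heuristic. — e.g. on getHeuristics([1, 2, 5, 0, 2, 3]): A returns 4, B returns 7
import Mathlib
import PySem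

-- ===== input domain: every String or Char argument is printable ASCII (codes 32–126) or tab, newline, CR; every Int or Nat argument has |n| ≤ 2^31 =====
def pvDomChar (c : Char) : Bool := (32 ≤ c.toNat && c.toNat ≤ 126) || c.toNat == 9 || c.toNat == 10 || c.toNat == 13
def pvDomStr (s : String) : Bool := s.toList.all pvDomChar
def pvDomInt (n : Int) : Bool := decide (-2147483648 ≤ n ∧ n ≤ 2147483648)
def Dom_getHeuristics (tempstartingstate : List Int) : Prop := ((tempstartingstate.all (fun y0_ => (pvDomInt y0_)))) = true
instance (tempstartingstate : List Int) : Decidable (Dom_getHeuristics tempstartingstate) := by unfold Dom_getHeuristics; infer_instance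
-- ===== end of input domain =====

-- B computes the geometric Manhattan distance |i//3 - j//3| + |i%3 - j%3| on the 2x3 grid
-- (j found once via list.index) instead of A's hand-written per-cell branch chains; on
-- inputs whose 6th element is 3 or 4 A's buggy i==5 chain returns a wrong total and B
-- returns the intended distance (stated as D_ below).  Objective: alternative.

-- ===== PORT A =====
def finalstate : List Int := [3, 2, 1, 4, 0, 5]

-- one iteration of A's inner j-loop (v = tempstartingstate[i]); branch order exactly as in A
def bodyA (v h i j : Int) : Int :=
  if v ≠ 0 ∧ v = (PySem.List.pyGet? finalstate j).getD 0 then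
    let findex := j
    if i = 0 then
      (if findex = 0 then h + 0 else if findex = 1 then h + 1 else if findex = 2 then h + 2 else if findex = 3 then h + 1 else if findex = 4 then h + 2 else if findex = 5 then h + 3 else h)
    else if i = 1 then
      (if findex = 0 then h + 1 else if findex = 1 then h + 0 else if findex = 2 then h + 1 else if findex = 3 then h + 2 else if findex = 4 then h + 1 else if findex = 5 then h + 2 else h)
    else if i = 2 then
      (if findex = 0 then h + 2 else if findex = 1 then h + 1 else if findex = 2 then h + 0 else if findex = 3 then h + 3 else if findex = 4 then h + 2 else if findex = 5 then h + 1 else h)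
    else if i = 3 then
      (if findex = 0 then h + 1 else if findex = 1 then h + 2 else if findex = 2 then h + 3 else if findex = 3 then h + 0 else if findex = 4 then h + 1 else if findex = 5 then h + 2 else h)
    else if i = 4 then
      (if findex = 0 then h + 2 else if findex = 1 then h + 1 else if findex = 2 then h + 2 else if findex = 3 then h + 1 else if findex = 4 then h + 0 else if findex = 5 then h + 1 else h)
    else if i = 5 then
      (if findex = 3 then h + 3 else if findex = 1 then h + 2 else if findex = 2 then h + 1 else if findex = 3 then h + 2 else if findex = 4 then h + 1 else if findex = 5 then h + 0 else h)
    else h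
  else h

def getHeuristics (tempstartingstate : List Int) : Int :=
  (PySem.List.pyRange 0 6 1).foldl (fun h i =>
    (PySem.List.pyRange 0 6 1).foldl
      (fun h j => bodyA ((PySem.List.pyGet? tempstartingstate i).getD 0) h i j) h) 0

-- ===== PORT B =====
-- one iteration of B's loop (v = tempstartingstate[i]): geometric Manhattan distance
def stepB (v i h : Int) : Int :=
  if v ≠ 0 ∧ v ∈ finalstate then
    match PySem.List.index? finalstate v with
    | some j =>
        h + |PySem.Int.floordiv i 3 - PySem.Int.floordiv (j : Int) 3|
          + |PySem.Int.mod i 3 - PySem.Int.mod (j : Int) 3|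
    | none => h   -- unreachable: guarded by v ∈ finalstate
  else h

def getHeuristics_alt (tempstartingstate : List Int) : Int :=
  (PySem.List.pyRange 0 6 1).foldl
    (fun h i => stepB ((PySem.List.pyGet? tempstartingstate i).getD 0) i h) 0

-- ===== PRECONDITION & SPEC =====
-- Python A indexes tempstartingstate[i] for i in range(6): it raises IndexError when the
-- list has fewer than 6 elements; Pre_ excludes exactly those inputs (B raises there too).
def Pre_getHeuristics (tempstartingstate : List Int) : Prop := 6 ≤ tempstartingstate.length
instance (tempstartingstate : List Int) : Decidable (Pre_getHeuristics tempstartingstate) := by unfold Pre_getHeuristics; infer_instance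
def pvWitness_getHeuristics : List Int := [1, 2, 3, 4, 5, 0]

-- On inputs of length ≥ 6 whose element at index 5 is 3 or 4, A's i==5 branch chain is
-- buggy (no branch for findex 0; findex 3 caught by a duplicated first branch adding 3):
-- A returns a total 3 too small (value 3) resp. 1 too large (value 4); B returns the true
-- Manhattan distance, the intended heuristic.
def D_getHeuristics (tempstartingstate : List Int) : Prop :=
  6 ≤ tempstartingstate.length ∧
    (tempstartingstate.getD 5 0 = 3 ∨ tempstartingstate.getD 5 0 = 4)
instance (tempstartingstate : List Int) : Decidable (D_getHeuristics tempstartingstate) := by unfold D_getHeuristics; infer_instance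

def Spec_getHeuristics (tempstartingstate : List Int) (out : Int) : Prop := ¬ D_getHeuristics tempstartingstate → out = getHeuristics_alt tempstartingstate
instance (tempstartingstate : List Int) (out : Int) : Decidable (Spec_getHeuristics tempstartingstate out) := by unfold Spec_getHeuristics; infer_instance

def pvDiffWitness_getHeuristics : List Int := [1, 2, 5, 0, 2, 3]
def pvDiffWitnessOut_getHeuristics : Int × Int := (4, 7)

-- ===== CLAIM (what is proved, stated in full; the proofs are below) =====
def Claim_unchanged_getHeuristics : Prop := ∀ (tempstartingstate : List Int), Dom_getHeuristics tempstartingstate → Pre_getHeuristics tempstartingstate → Spec_getHeuristics tempstartingstate (getHeuristics tempstartingstate)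
def Claim_changed_getHeuristics : Prop := Dom_getHeuristics (pvDiffWitness_getHeuristics) ∧ Pre_getHeuristics (pvDiffWitness_getHeuristics) ∧ D_getHeuristics (pvDiffWitness_getHeuristics) ∧ getHeuristics (pvDiffWitness_getHeuristics) = pvDiffWitnessOut_getHeuristics.1 ∧ getHeuristics_alt (pvDiffWitness_getHeuristics) = pvDiffWitnessOut_getHeuristics.2 ∧ pvDiffWitnessOut_getHeuristics.1 ≠ pvDiffWitnessOut_getHeuristics.2
def Claim_exact_getHeuristics : Prop := ∀ (tempstartingstate : List Int), Dom_getHeuristics tempstartingstate → Pre_getHeuristics tempstartingstate → D_getHeuristics tempstartingstate → getHeuristics tempstartingstate ≠ getHeuristics_alt tempstartingstate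

-- ===== LEMMAS AND PROOFS =====

-- A's inner j-loop for a fixed row i equals B's single arithmetic step, row by row:
-- for v ∈ {0,...,5} both sides reduce to the same literal update (rfl); for any
-- other v every branch misses on both sides.

lemma row0 (v h : Int) :
    bodyA v (bodyA v (bodyA v (bodyA v (bodyA v (bodyA v h 0 0) 0 1) 0 2) 0 3) 0 4) 0 5 = stepB v 0 h := by
  rcases eq_or_ne v 0 with rfl|hv0; · simp [bodyA, stepB, finalstate, List.idxOf?, List.findIdx?, List.findIdx?.go, PySem.Int.floordiv, PySem.Int.mod, PySem.List.pyGet?, PySem.List.pyIdx?] <;> omega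
  rcases eq_or_ne v 1 with rfl|hv1; · simp [bodyA, stepB, finalstate, List.idxOf?, List.findIdx?, List.findIdx?.go, PySem.Int.floordiv, PySem.Int.mod, PySem.List.pyGet?, PySem.List.pyIdx?] <;> omega
  rcases eq_or_ne v 2 with rfl|hv2; · simp [bodyA, stepB, finalstate, List.idxOf?, List.findIdx?, List.findIdx?.go, PySem.Int.floordiv, PySem.Int.mod, PySem.List.pyGet?, PySem.List.pyIdx?] <;> omega
  rcases eq_or_ne v 3 with rfl|hv3; · simp [bodyA, stepB, finalstate, List.idxOf?, List.findIdx?, List.findIdx?.go, PySem.Int.floordiv, PySem.Int.mod, PySem.List.pyGet?, PySem.List.pyIdx?] <;> omega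
  rcases eq_or_ne v 4 with rfl|hv4; · simp [bodyA, stepB, finalstate, List.idxOf?, List.findIdx?, List.findIdx?.go, PySem.Int.floordiv, PySem.Int.mod, PySem.List.pyGet?, PySem.List.pyIdx?] <;> omega
  rcases eq_or_ne v 5 with rfl|hv5; · simp [bodyA, stepB, finalstate, List.idxOf?, List.findIdx?, List.findIdx?.go, PySem.Int.floordiv, PySem.Int.mod, PySem.List.pyGet?, PySem.List.pyIdx?] <;> omega
  simp [bodyA, stepB, hv0, hv1, hv2, hv3, hv4, hv5, finalstate,
    PySem.List.pyGet?, PySem.List.pyIdx?] <;> omega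

lemma row1 (v h : Int) :
    bodyA v (bodyA v (bodyA v (bodyA v (bodyA v (bodyA v h 1 0) 1 1) 1 2) 1 3) 1 4) 1 5 = stepB v 1 h := by
  rcases eq_or_ne v 0 with rfl|hv0; · simp [bodyA, stepB, finalstate, List.idxOf?, List.findIdx?, List.findIdx?.go, PySem.Int.floordiv, PySem.Int.mod, PySem.List.pyGet?, PySem.List.pyIdx?] <;> omega
  rcases eq_or_ne v 1 with rfl|hv1; · simp [bodyA, stepB, finalstate, List.idxOf?, List.findIdx?, List.findIdx?.go, PySem.Int.floordiv, PySem.Int.mod, PySem.List.pyGet?, PySem.List.pyIdx?] <;> omega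
  rcases eq_or_ne v 2 with rfl|hv2; · simp [bodyA, stepB, finalstate, List.idxOf?, List.findIdx?, List.findIdx?.go, PySem.Int.floordiv, PySem.Int.mod, PySem.List.pyGet?, PySem.List.pyIdx?] <;> omega
  rcases eq_or_ne v 3 with rfl|hv3; · simp [bodyA, stepB, finalstate, List.idxOf?, List.findIdx?, List.findIdx?.go, PySem.Int.floordiv, PySem.Int.mod, PySem.List.pyGet?, PySem.List.pyIdx?] <;> omega
  rcases eq_or_ne v 4 with rfl|hv4; · simp [bodyA, stepB, finalstate, List.idxOf?, List.findIdx?, List.findIdx?.go, PySem.Int.floordiv, PySem.Int.mod, PySem.List.pyGet?, PySem.List.pyIdx?] <;> omega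
  rcases eq_or_ne v 5 with rfl|hv5; · simp [bodyA, stepB, finalstate, List.idxOf?, List.findIdx?, List.findIdx?.go, PySem.Int.floordiv, PySem.Int.mod, PySem.List.pyGet?, PySem.List.pyIdx?] <;> omega
  simp [bodyA, stepB, hv0, hv1, hv2, hv3, hv4, hv5, finalstate,
    PySem.List.pyGet?, PySem.List.pyIdx?] <;> omega

lemma row2 (v h : Int) :
    bodyA v (bodyA v (bodyA v (bodyA v (bodyA v (bodyA v h 2 0) 2 1) 2 2) 2 3) 2 4) 2 5 = stepB v 2 h := by
  rcases eq_or_ne v 0 with rfl|hv0; · simp [bodyA, stepB, finalstate, List.idxOf?, List.findIdx?, List.findIdx?.go, PySem.Int.floordiv, PySem.Int.mod, PySem.List.pyGet?, PySem.List.pyIdx?] <;> omega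
  rcases eq_or_ne v 1 with rfl|hv1; · simp [bodyA, stepB, finalstate, List.idxOf?, List.findIdx?, List.findIdx?.go, PySem.Int.floordiv, PySem.Int.mod, PySem.List.pyGet?, PySem.List.pyIdx?] <;> omega
  rcases eq_or_ne v 2 with rfl|hv2; · simp [bodyA, stepB, finalstate, List.idxOf?, List.findIdx?, List.findIdx?.go, PySem.Int.floordiv, PySem.Int.mod, PySem.List.pyGet?, PySem.List.pyIdx?] <;> omega
  rcases eq_or_ne v 3 with rfl|hv3; · simp [bodyA, stepB, finalstate, List.idxOf?, List.findIdx?, List.findIdx?.go, PySem.Int.floordiv, PySem.Int.mod, PySem.List.pyGet?, PySem.List.pyIdx?] <;> omega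
  rcases eq_or_ne v 4 with rfl|hv4; · simp [bodyA, stepB, finalstate, List.idxOf?, List.findIdx?, List.findIdx?.go, PySem.Int.floordiv, PySem.Int.mod, PySem.List.pyGet?, PySem.List.pyIdx?] <;> omega
  rcases eq_or_ne v 5 with rfl|hv5; · simp [bodyA, stepB, finalstate, List.idxOf?, List.findIdx?, List.findIdx?.go, PySem.Int.floordiv, PySem.Int.mod, PySem.List.pyGet?, PySem.List.pyIdx?] <;> omega
  simp [bodyA, stepB, hv0, hv1, hv2, hv3, hv4, hv5, finalstate,
    PySem.List.pyGet?, PySem.List.pyIdx?] <;> omega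

lemma row3 (v h : Int) :
    bodyA v (bodyA v (bodyA v (bodyA v (bodyA v (bodyA v h 3 0) 3 1) 3 2) 3 3) 3 4) 3 5 = stepB v 3 h := by
  rcases eq_or_ne v 0 with rfl|hv0; · simp [bodyA, stepB, finalstate, List.idxOf?, List.findIdx?, List.findIdx?.go, PySem.Int.floordiv, PySem.Int.mod, PySem.List.pyGet?, PySem.List.pyIdx?] <;> omega
  rcases eq_or_ne v 1 with rfl|hv1; · simp [bodyA, stepB, finalstate, List.idxOf?, List.findIdx?, List.findIdx?.go, PySem.Int.floordiv, PySem.Int.mod, PySem.List.pyGet?, PySem.List.pyIdx?] <;> omega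
  rcases eq_or_ne v 2 with rfl|hv2; · simp [bodyA, stepB, finalstate, List.idxOf?, List.findIdx?, List.findIdx?.go, PySem.Int.floordiv, PySem.Int.mod, PySem.List.pyGet?, PySem.List.pyIdx?] <;> omega
  rcases eq_or_ne v 3 with rfl|hv3; · simp [bodyA, stepB, finalstate, List.idxOf?, List.findIdx?, List.findIdx?.go, PySem.Int.floordiv, PySem.Int.mod, PySem.List.pyGet?, PySem.List.pyIdx?] <;> omega
  rcases eq_or_ne v 4 with rfl|hv4; · simp [bodyA, stepB, finalstate, List.idxOf?, List.findIdx?, List.findIdx?.go, PySem.Int.floordiv, PySem.Int.mod, PySem.List.pyGet?, PySem.List.pyIdx?] <;> omega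
  rcases eq_or_ne v 5 with rfl|hv5; · simp [bodyA, stepB, finalstate, List.idxOf?, List.findIdx?, List.findIdx?.go, PySem.Int.floordiv, PySem.Int.mod, PySem.List.pyGet?, PySem.List.pyIdx?] <;> omega
  simp [bodyA, stepB, hv0, hv1, hv2, hv3, hv4, hv5, finalstate,
    PySem.List.pyGet?, PySem.List.pyIdx?] <;> omega

lemma row4 (v h : Int) :
    bodyA v (bodyA v (bodyA v (bodyA v (bodyA v (bodyA v h 4 0) 4 1) 4 2) 4 3) 4 4) 4 5 = stepB v 4 h := by
  rcases eq_or_ne v 0 with rfl|hv0; · simp [bodyA, stepB, finalstate, List.idxOf?, List.findIdx?, List.findIdx?.go, PySem.Int.floordiv, PySem.Int.mod, PySem.List.pyGet?, PySem.List.pyIdx?] <;> omega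
  rcases eq_or_ne v 1 with rfl|hv1; · simp [bodyA, stepB, finalstate, List.idxOf?, List.findIdx?, List.findIdx?.go, PySem.Int.floordiv, PySem.Int.mod, PySem.List.pyGet?, PySem.List.pyIdx?] <;> omega
  rcases eq_or_ne v 2 with rfl|hv2; · simp [bodyA, stepB, finalstate, List.idxOf?, List.findIdx?, List.findIdx?.go, PySem.Int.floordiv, PySem.Int.mod, PySem.List.pyGet?, PySem.List.pyIdx?] <;> omega
  rcases eq_or_ne v 3 with rfl|hv3; · simp [bodyA, stepB, finalstate, List.idxOf?, List.findIdx?, List.findIdx?.go, PySem.Int.floordiv, PySem.Int.mod, PySem.List.pyGet?, PySem.List.pyIdx?] <;> omega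
  rcases eq_or_ne v 4 with rfl|hv4; · simp [bodyA, stepB, finalstate, List.idxOf?, List.findIdx?, List.findIdx?.go, PySem.Int.floordiv, PySem.Int.mod, PySem.List.pyGet?, PySem.List.pyIdx?] <;> omega
  rcases eq_or_ne v 5 with rfl|hv5; · simp [bodyA, stepB, finalstate, List.idxOf?, List.findIdx?, List.findIdx?.go, PySem.Int.floordiv, PySem.Int.mod, PySem.List.pyGet?, PySem.List.pyIdx?] <;> omega
  simp [bodyA, stepB, hv0, hv1, hv2, hv3, hv4, hv5, finalstate,
    PySem.List.pyGet?, PySem.List.pyIdx?] <;> omega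

-- row 5, values other than the buggy 3 and 4: A's chain and B's arithmetic agree
lemma row5_ne (v h : Int) (h3 : v ≠ 3) (h4 : v ≠ 4) :
    bodyA v (bodyA v (bodyA v (bodyA v (bodyA v (bodyA v h 5 0) 5 1) 5 2) 5 3) 5 4) 5 5 = stepB v 5 h := by
  rcases eq_or_ne v 0 with rfl|hv0; · simp [bodyA, stepB, finalstate, List.idxOf?, List.findIdx?, List.findIdx?.go, PySem.Int.floordiv, PySem.Int.mod, PySem.List.pyGet?, PySem.List.pyIdx?] <;> omega
  rcases eq_or_ne v 1 with rfl|hv1; · simp [bodyA, stepB, finalstate, List.idxOf?, List.findIdx?, List.findIdx?.go, PySem.Int.floordiv, PySem.Int.mod, PySem.List.pyGet?, PySem.List.pyIdx?] <;> omega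
  rcases eq_or_ne v 2 with rfl|hv2; · simp [bodyA, stepB, finalstate, List.idxOf?, List.findIdx?, List.findIdx?.go, PySem.Int.floordiv, PySem.Int.mod, PySem.List.pyGet?, PySem.List.pyIdx?] <;> omega
  rcases eq_or_ne v 5 with rfl|hv5; · simp [bodyA, stepB, finalstate, List.idxOf?, List.findIdx?, List.findIdx?.go, PySem.Int.floordiv, PySem.Int.mod, PySem.List.pyGet?, PySem.List.pyIdx?] <;> omega
  simp [bodyA, stepB, hv0, hv1, hv2, h3, h4, hv5, finalstate,
    PySem.List.pyGet?, PySem.List.pyIdx?] <;> omega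

-- row 5, the two buggy values: A misses findex 0 (v = 3) and double-counts findex 3 (v = 4)
lemma row5A_3 (h : Int) :
    bodyA 3 (bodyA 3 (bodyA 3 (bodyA 3 (bodyA 3 (bodyA 3 h 5 0) 5 1) 5 2) 5 3) 5 4) 5 5 = h := rfl
lemma row5A_4 (h : Int) :
    bodyA 4 (bodyA 4 (bodyA 4 (bodyA 4 (bodyA 4 (bodyA 4 h 5 0) 5 1) 5 2) 5 3) 5 4) 5 5 = h + 3 := rfl
lemma stepB_3 (h : Int) : stepB 3 5 h = h + 3 := by
  simp [bodyA, stepB, finalstate, List.idxOf?, List.findIdx?, List.findIdx?.go, PySem.Int.floordiv, PySem.Int.mod, PySem.List.pyGet?, PySem.List.pyIdx?] <;> omega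
lemma stepB_4 (h : Int) : stepB 4 5 h = h + 2 := by
  simp [bodyA, stepB, finalstate, List.idxOf?, List.findIdx?, List.findIdx?.go, PySem.Int.floordiv, PySem.Int.mod, PySem.List.pyGet?, PySem.List.pyIdx?] <;> omega

lemma pyRange06 : PySem.List.pyRange 0 6 1 = [0, 1, 2, 3, 4, 5] := by decide

lemma get5_eq (t : List Int) : (PySem.List.pyGet? t 5).getD 0 = t.getD 5 0 := by
  simp only [PySem.List.pyGet?, PySem.List.pyIdx?, List.getD]
  by_cases h5 : 5 < t.length
  · simp [h5]
  · simp [h5, List.getElem?_eq_none (by omega : t.length ≤ 5)]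

-- ===== VERDICT (by name: the statements are the Claim_ definitions above) =====
theorem getHeuristics_spec : Claim_unchanged_getHeuristics := by
  intro t _ hpre
  unfold Spec_getHeuristics
  intro hD
  unfold D_getHeuristics at hD
  push Not at hD
  obtain ⟨h3, h4⟩ := hD hpre
  unfold getHeuristics getHeuristics_alt
  rw [pyRange06]
  simp only [List.foldl]
  rw [row0, row1, row2, row3, row4,
    row5_ne _ _ (by rw [get5_eq]; exact h3) (by rw [get5_eq]; exact h4)]

theorem getHeuristics_changed : Claim_changed_getHeuristics := by
  unfold Claim_changed_getHeuristics; decide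

theorem getHeuristics_tight : Claim_exact_getHeuristics := by
  intro t _ _ hD
  obtain ⟨-, hv⟩ := hD
  unfold getHeuristics getHeuristics_alt
  rw [pyRange06]
  simp only [List.foldl]
  rw [row0, row1, row2, row3, row4]
  rcases hv with hv | hv <;>
    rw [show (PySem.List.pyGet? t 5).getD 0 = _ from (get5_eq t).trans hv]
  · rw [row5A_3, stepB_3]; omega
  · rw [row5A_4, stepB_4]; omega
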